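-- pv_equiv track=rewrite | github.com/dmorazzini23/ai-trading-bot | ai_trading/utils/universe.py | _split_symbols
-- ===== SOURCE A (Python) =====
-- def _split_symbols(s: str) -> list[str]:
--     s = s.replace("\r", "")
--     parts: list[str] = []
--     for line in s.split("\n"):
--         if "," in line:
--             parts.extend((x.strip() for x in line.split(",")))
--         else:
--             parts.append(line.strip())
--     return [p for p in parts if p]
-- ===== SOURCE B (Python) =====
-- def _split_symbols(s: str) -> list[str]:
--     out: list[str] = []
--     cur: list[str] = []
--     for ch in s:
--         if ch == "\r":
--             continue
--         if ch == "\n" or ch == ",":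
--             tok = "".join(cur).strip()
--             if tok:
--                 out.append(tok)
--             cur = []
--         else:
--             cur.append(ch)
--     tok = "".join(cur).strip()
--     if tok:
--         out.append(tok)
--     return out
-- ===== Notes on version B (the rewrite author's own statement) =====
-- stated objective: alternative
-- what changed: A's staged pipeline (global replace, split into lines, branch on ',' and re-split, then a final filter pass) is replaced by a single character-level scan with an accumulator: one loop over the characters flushes the current token at each '\n'/',' , skips '\r', and appends the stripped token only if non-empty.
import Mathlib
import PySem

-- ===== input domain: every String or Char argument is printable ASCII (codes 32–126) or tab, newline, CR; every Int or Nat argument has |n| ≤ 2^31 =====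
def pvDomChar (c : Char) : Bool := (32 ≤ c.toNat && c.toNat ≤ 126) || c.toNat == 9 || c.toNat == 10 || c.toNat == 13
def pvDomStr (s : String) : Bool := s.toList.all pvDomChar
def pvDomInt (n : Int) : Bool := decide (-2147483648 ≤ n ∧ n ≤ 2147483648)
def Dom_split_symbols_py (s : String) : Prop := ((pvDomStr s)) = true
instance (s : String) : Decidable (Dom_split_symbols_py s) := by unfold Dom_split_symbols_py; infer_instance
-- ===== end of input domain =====

-- B replaces A's staged pipeline (replace '\r', split into lines, branch + re-split on ',',
-- final filter) by ONE character-level scan with a token accumulator — objective: alternative.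

-- ===== PORT A =====
-- A: remove '\r'; for each '\n'-line, if it contains ',' extend with the stripped
-- comma-pieces, else append the stripped line; finally keep the non-empty parts.
def split_symbols_py (s : String) : List String :=
  let s1 := PySem.Str.replace s "\r" ""
  let parts : List String :=
    (PySem.Chars.splitOn s1.toList ['\n']).foldl
      (fun parts line =>
        if PySem.Chars.isIn [','] line then
          parts ++ (PySem.Chars.splitOn line [',']).map
            (fun x => String.ofList (PySem.Chars.strip x))
        else
          parts ++ [String.ofList (PySem.Chars.strip line)])
      []
  parts.filter (fun p => p ≠ "")

-- ===== PORT B =====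
-- B: single scan; skip '\r'; on '\n'/',' flush the accumulated token (strip, append
-- iff non-empty); otherwise push the character onto the current token; final flush.
def flushTok (out : List String) (cur : List Char) : List String :=
  let tok := String.ofList (PySem.Chars.strip cur)
  if tok ≠ "" then out ++ [tok] else out

def split_symbols_py_alt (s : String) : List String :=
  let st := s.toList.foldl
    (fun (st : List String × List Char) ch =>
      if ch = '\r' then st
      else if ch = '\n' ∨ ch = ',' then (flushTok st.1 st.2, [])
      else (st.1, st.2 ++ [ch]))
    ([], [])
  flushTok st.1 st.2

-- ===== PRECONDITION & SPEC =====
def Spec_split_symbols_py (s : String) (out : List String) : Prop := out = split_symbols_py_alt s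
instance (s : String) (out : List String) : Decidable (Spec_split_symbols_py s out) := by unfold Spec_split_symbols_py; infer_instance

-- ===== CLAIM (what is proved, stated in full; the proofs are below) =====
def Claim_equal_split_symbols_py : Prop := ∀ (s : String), Dom_split_symbols_py s → Spec_split_symbols_py s (split_symbols_py s)

-- ===== LEMMAS AND PROOFS =====

-- Specification form of splitting on a single character.
def splitCh (a : Char) : List Char → List (List Char)
  | [] => [[]]
  | c :: t => if c = a then [] :: splitCh a t else (splitCh a t).modifyHead (c :: ·)

-- Splitting on EITHER of the two delimiters at once.
def splitCh2 : List Char → List (List Char)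
  | [] => [[]]
  | c :: t => if c = '\n' ∨ c = ',' then [] :: splitCh2 t else (splitCh2 t).modifyHead (c :: ·)

-- B's token stream: skip '\r', cut at '\n'/',', accumulate otherwise.
def toks (cur : List Char) : List Char → List (List Char)
  | [] => [cur]
  | c :: t => if c = '\r' then toks cur t
              else if c = '\n' ∨ c = ',' then cur :: toks [] t
              else toks (cur ++ [c]) t

-- strip-and-keep-non-empty, the common postprocessing of both programs.
def emit (ts : List (List Char)) : List String :=
  (ts.map (fun x => String.ofList (PySem.Chars.strip x))).filter (fun p => p ≠ "")

theorem splitCh_ne_nil (a : Char) (l : List Char) : splitCh a l ≠ [] := by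
  induction l with
  | nil => simp [splitCh]
  | cons c t ih =>
    simp only [splitCh]
    split
    · simp
    · intro h
      exact ih (List.length_eq_zero_iff.mp (by simpa using congrArg List.length h))

theorem splitCh_shape (a : Char) (l : List Char) :
    ∃ h L, splitCh a l = h :: L := by
  cases hE : splitCh a l with
  | nil => exact absurd hE (splitCh_ne_nil a l)
  | cons h L => exact ⟨h, L, rfl⟩

theorem modifyHead_id' {α : Type} (l : List α) : List.modifyHead (fun x => x) l = l := by
  cases l <;> simp

theorem modifyHead_nil_append {α : Type} (l : List (List α)) :
    List.modifyHead (fun x => [] ++ x) l = l := by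
  cases l <;> simp

theorem splitOn_go_eq_splitCh (a : Char) (l cur : List Char) (acc : List (List Char))
    (fuel : Nat) (hf : l.length ≤ fuel) :
    PySem.Chars.splitOn.go [a] fuel l cur acc
      = acc.reverse ++ (splitCh a l).modifyHead (cur.reverse ++ ·) := by
  induction fuel generalizing l cur acc with
  | zero =>
    have : l = [] := List.length_eq_zero_iff.mp (Nat.le_zero.mp hf)
    subst this
    simp [PySem.Chars.splitOn.go, splitCh]
  | succ fuel ih =>
    cases l with
    | nil => simp [PySem.Chars.splitOn.go, splitCh]
    | cons c rest =>
      simp only [PySem.Chars.splitOn.go]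
      simp only [List.length_cons] at hf
      by_cases hca : c = a
      · subst hca
        have hpre : List.isPrefixOf [c] (c :: rest) = true := by
          simp [List.isPrefixOf]
        rw [if_pos hpre]
        simp only [List.length_cons, List.length_nil, Nat.zero_add, List.drop_succ_cons,
          List.drop_zero]
        rw [ih rest [] (cur.reverse :: acc) (by omega)]
        simp [splitCh, modifyHead_id']
      · have hpre : List.isPrefixOf [a] (c :: rest) = false := by
          simp only [List.isPrefixOf, Bool.and_true,
            beq_eq_false_iff_ne, ne_eq]
          intro h
          exact hca h.symm
        rw [if_neg (by simp [hpre])]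
        rw [ih rest (c :: cur) acc (by omega)]
        simp only [splitCh, if_neg hca, List.modifyHead_modifyHead, List.reverse_cons]
        congr 2
        funext x
        simp

theorem splitOn_eq_splitCh (a : Char) (s : List Char) :
    PySem.Chars.splitOn s [a] = splitCh a s := by
  unfold PySem.Chars.splitOn
  rw [splitOn_go_eq_splitCh a s [] [] (s.length + 1) (by omega)]
  simp [modifyHead_id']

theorem replace_go_eq_flatMap (a : Char) (new : List Char) (l acc : List Char)
    (fuel : Nat) (hf : l.length ≤ fuel) :
    PySem.Chars.replace.go [a] new fuel l acc
      = acc.reverse ++ l.flatMap (fun c => if c = a then new else [c]) := by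
  induction fuel generalizing l acc with
  | zero =>
    have : l = [] := List.length_eq_zero_iff.mp (Nat.le_zero.mp hf)
    subst this
    simp [PySem.Chars.replace.go]
  | succ fuel ih =>
    cases l with
    | nil => simp [PySem.Chars.replace.go]
    | cons c rest =>
      simp only [PySem.Chars.replace.go]
      simp only [List.length_cons] at hf
      by_cases hca : c = a
      · subst hca
        have hpre : List.isPrefixOf [c] (c :: rest) = true := by
          simp [List.isPrefixOf]
        rw [if_pos hpre]
        simp only [List.length_cons, List.length_nil, Nat.zero_add, List.drop_succ_cons,
          List.drop_zero]
        rw [ih rest (new.reverse ++ acc) (by omega)]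
        simp
      · have hpre : List.isPrefixOf [a] (c :: rest) = false := by
          simp only [List.isPrefixOf, Bool.and_true,
            beq_eq_false_iff_ne, ne_eq]
          intro h
          exact hca h.symm
        rw [if_neg (by simp [hpre])]
        rw [ih rest (c :: acc) (by omega)]
        simp [hca]

theorem replace_single_eq_flatMap (a : Char) (new s : List Char) :
    PySem.Chars.replace s [a] new
      = s.flatMap (fun c => if c = a then new else [c]) := by
  unfold PySem.Chars.replace
  rw [if_neg (by simp)]
  exact replace_go_eq_flatMap a new s [] s.length le_rfl

theorem flatMap_del_eq_filter (l : List Char) :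
    l.flatMap (fun c => if c = '\r' then [] else [c]) = l.filter (fun c => c ≠ '\r') := by
  induction l with
  | nil => rfl
  | cons c t ih =>
    by_cases hc : c = '\r' <;> simp [hc, ih]

theorem splitCh_of_not_mem (a : Char) (l : List Char) (h : a ∉ l) :
    splitCh a l = [l] := by
  induction l with
  | nil => rfl
  | cons c t ih =>
    simp only [List.mem_cons, not_or] at h
    have hne : ¬ c = a := fun hca => h.1 hca.symm
    simp [splitCh, hne, ih h.2]

-- Per-line value of A's loop body, independent of the branch taken.
theorem branch_eq (line : List Char) :
    (if PySem.Chars.isIn [','] line then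
        (PySem.Chars.splitOn line [',']).map (fun x => String.ofList (PySem.Chars.strip x))
      else [String.ofList (PySem.Chars.strip line)])
      = (splitCh ',' line).map (fun x => String.ofList (PySem.Chars.strip x)) := by
  by_cases hin : PySem.Chars.isIn [','] line = true
  · rw [if_pos hin, splitOn_eq_splitCh]
  · rw [if_neg hin]
    have hni : ¬ [','] <:+: line :=
      (PySem.Chars.isIn_eq_false_iff [','] line).mp (by simpa using hin)
    have hmem : ',' ∉ line := fun hm => hni ((List.singleton_infix_iff ',' line).mpr hm)
    rw [splitCh_of_not_mem ',' line hmem]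
    simp

-- Splitting on both delimiters at once = split on '\n', then each piece on ','.
theorem splitCh2_eq_nested (l : List Char) :
    splitCh2 l = (splitCh '\n' l).flatMap (splitCh ',') := by
  induction l with
  | nil => simp [splitCh2, splitCh]
  | cons c t ih =>
    obtain ⟨h, L, hE⟩ := splitCh_shape '\n' t
    by_cases h1 : c = '\n'
    · subst h1
      simp [splitCh2, splitCh, ih]
    · by_cases h2 : c = ','
      · subst h2
        rw [show splitCh2 (',' :: t) = [] :: splitCh2 t by simp [splitCh2]]
        rw [show splitCh '\n' (',' :: t) = (',' :: h) :: L by simp [splitCh, h1, hE]]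
        rw [ih, hE]
        simp [splitCh]
      · rw [show splitCh2 (c :: t) = (splitCh2 t).modifyHead (c :: ·) by
            simp [splitCh2, h1, h2]]
        rw [show splitCh '\n' (c :: t) = (c :: h) :: L by simp [splitCh, h1, hE]]
        rw [ih, hE]
        simp only [List.flatMap_cons]
        rw [show splitCh ',' (c :: h) = (splitCh ',' h).modifyHead (c :: ·) by
            simp [splitCh, h2]]
        cases hS : splitCh ',' h with
        | nil => exact absurd hS (splitCh_ne_nil ',' h)
        | cons u U => simp

theorem emit_cons (x : List Char) (ts : List (List Char)) :
    emit (x :: ts) = flushTok [] x ++ emit ts := by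
  unfold emit flushTok
  simp only [List.map_cons, List.filter_cons]
  split <;> simp_all

theorem flushTok_eq (out : List String) (cur : List Char) :
    flushTok out cur = out ++ flushTok [] cur := by
  unfold flushTok
  by_cases h : String.ofList (PySem.Chars.strip cur) ≠ "" <;> simp [h]

-- B's fold, characterised by the token stream `toks`.
theorem bfold_eq (l : List Char) (out : List String) (cur : List Char) :
    (let st := l.foldl
        (fun (st : List String × List Char) ch =>
          if ch = '\r' then st
          else if ch = '\n' ∨ ch = ',' then (flushTok st.1 st.2, [])
          else (st.1, st.2 ++ [ch]))
        (out, cur)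
     flushTok st.1 st.2) = out ++ emit (toks cur l) := by
  induction l generalizing out cur with
  | nil =>
    simp only [List.foldl_nil, toks]
    rw [emit_cons, flushTok_eq out cur]
    simp [emit]
  | cons c t ih =>
    by_cases h1 : c = '\r'
    · subst h1
      simpa [toks] using ih out cur
    · by_cases h2 : c = '\n' ∨ c = ','
      · simp only [List.foldl_cons, if_neg h1, if_pos h2]
        rw [show toks cur (c :: t) = cur :: toks [] t by simp [toks, h1, h2]]
        rw [ih, emit_cons, flushTok_eq out cur, List.append_assoc]
      · simp only [List.foldl_cons, if_neg h1, if_neg h2]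
        rw [show toks cur (c :: t) = toks (cur ++ [c]) t by simp [toks, h1, h2]]
        exact ih out (cur ++ [c])

theorem toks_eq_splitCh2 (l : List Char) (cur : List Char) :
    toks cur l = (splitCh2 (l.filter (fun c => c ≠ '\r'))).modifyHead (cur ++ ·) := by
  induction l generalizing cur with
  | nil => simp [toks, splitCh2]
  | cons c t ih =>
    by_cases h1 : c = '\r'
    · subst h1
      rw [show toks cur ('\r' :: t) = toks cur t by simp [toks]]
      rw [ih]
      simp
    · by_cases h2 : c = '\n' ∨ c = ','
      · rw [show toks cur (c :: t) = cur :: toks [] t by simp [toks, h1, h2]]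
        rw [ih]
        rw [show (c :: t).filter (fun c => c ≠ '\r') = c :: t.filter (fun c => c ≠ '\r') by
          simp [h1]]
        rw [show splitCh2 (c :: t.filter (fun c => c ≠ '\r'))
              = [] :: splitCh2 (t.filter (fun c => c ≠ '\r')) by simp [splitCh2, h2]]
        simp [modifyHead_id']
      · rw [show toks cur (c :: t) = toks (cur ++ [c]) t by simp [toks, h1, h2]]
        rw [ih]
        rw [show (c :: t).filter (fun c => c ≠ '\r') = c :: t.filter (fun c => c ≠ '\r') by
          simp [h1]]
        rw [show splitCh2 (c :: t.filter (fun c => c ≠ '\r'))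
              = (splitCh2 (t.filter (fun c => c ≠ '\r'))).modifyHead (c :: ·) by
            simp [splitCh2, h2]]
        rw [List.modifyHead_modifyHead]
        congr 1
        funext x
        simp

-- ===== VERDICT (by name: the statement is the Claim_ definition above) =====
theorem split_symbols_py_spec : Claim_equal_split_symbols_py := by
  intro s _
  unfold Spec_split_symbols_py
  -- B side: one scan = emit of the two-delimiter split of the '\r'-free characters.
  have hB : split_symbols_py_alt s
      = emit (splitCh2 (s.toList.filter (fun c => c ≠ '\r'))) := by
    unfold split_symbols_py_alt
    rw [bfold_eq s.toList [] [], toks_eq_splitCh2, modifyHead_nil_append]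
    simp
  -- A side: staged pipeline = emit of the nested split of the same characters.
  have hA : split_symbols_py s
      = emit ((splitCh '\n' (s.toList.filter (fun c => c ≠ '\r'))).flatMap (splitCh ',')) := by
    unfold split_symbols_py
    simp only []
    have hs1 : (PySem.Str.replace s "\r" "").toList
        = s.toList.filter (fun c => c ≠ '\r') := by
      rw [PySem.Str.toList_replace]
      rw [show ("\r" : String).toList = ['\r'] from rfl, show ("" : String).toList = [] from rfl]
      rw [replace_single_eq_flatMap]
      exact flatMap_del_eq_filter s.toList
    rw [hs1]
    have hfold :
        (PySem.Chars.splitOn (s.toList.filter (fun c => c ≠ '\r')) ['\n']).foldl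
          (fun parts line =>
            if PySem.Chars.isIn [','] line then
              parts ++ (PySem.Chars.splitOn line [',']).map
                (fun x => String.ofList (PySem.Chars.strip x))
            else parts ++ [String.ofList (PySem.Chars.strip line)]) []
          = (PySem.Chars.splitOn (s.toList.filter (fun c => c ≠ '\r')) ['\n']).flatMap
              (fun line => (splitCh ',' line).map (fun x => String.ofList (PySem.Chars.strip x))) := by
      rw [show (fun (parts : List String) (line : List Char) =>
            if PySem.Chars.isIn [','] line then
              parts ++ (PySem.Chars.splitOn line [',']).map
                (fun x => String.ofList (PySem.Chars.strip x))
            else parts ++ [String.ofList (PySem.Chars.strip line)])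
          = (fun parts line => parts ++
              (splitCh ',' line).map (fun x => String.ofList (PySem.Chars.strip x))) by
        funext parts line
        rw [show (if PySem.Chars.isIn [','] line then
              parts ++ (PySem.Chars.splitOn line [',']).map
                (fun x => String.ofList (PySem.Chars.strip x))
            else parts ++ [String.ofList (PySem.Chars.strip line)])
            = parts ++ (if PySem.Chars.isIn [','] line then
                (PySem.Chars.splitOn line [',']).map (fun x => String.ofList (PySem.Chars.strip x))
              else [String.ofList (PySem.Chars.strip line)]) by
          split <;> rfl]
        rw [branch_eq]]
      simpa using PySem.List.foldl_append_eq_flatMap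
        (fun line => (splitCh ',' line).map (fun x => String.ofList (PySem.Chars.strip x)))
        (PySem.Chars.splitOn (s.toList.filter (fun c => c ≠ '\r')) ['\n']) []
    rw [hfold, splitOn_eq_splitCh]
    unfold emit
    rw [List.map_flatMap]
  rw [hA, hB, splitCh2_eq_nested]
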